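-- pv_equiv track=rewrite | github.com/Ensembl/ensembl-hive | wrappers/python3/eHive/examples/LongMult/AddTogether.py | add_together
-- ===== SOURCE A (Python) =====
-- def add_together(b_multiplier, partial_product):
--
--     b_multiplier = str(b_multiplier)
--     accu = [0] * (1 + len(b_multiplier) + len(partial_product['1']))
--
--     for (i,b_digit) in enumerate(reversed(b_multiplier)):
--         product = str(partial_product[b_digit])
--         for (j,p_digit) in enumerate(reversed(product)):
--             accu[i+j] += int(p_digit)
--
--     carry = 0
--     for i in range(len(accu)):
--         val = carry + accu[i]
--         accu[i] = val % 10
--         carry = val // 10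
--
--     return ''.join(str(_) for _ in reversed(accu)).lstrip('0')
-- ===== SOURCE B (Python) =====
-- def add_together(b_multiplier, partial_product):
--     total = 0
--     for i, b_digit in enumerate(reversed(str(b_multiplier))):
--         for j, p_digit in enumerate(reversed(partial_product[b_digit])):
--             total += int(p_digit) * 10 ** (i + j)
--     return str(total).lstrip('0')
-- ===== Notes on version B (the rewrite author's own statement) =====
-- stated objective: simpler
-- what changed: B drops A's fixed-size digit-accumulator array, carry-propagation pass and digit-join: it accumulates one running integer total += digit * 10**(i+j) and formats it with str(total).lstrip('0').
-- outside the precondition, e.g. on add_together(99, {'1': '9', '9': '999'}): A returns '989', B returns '10989'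
import Mathlib
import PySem

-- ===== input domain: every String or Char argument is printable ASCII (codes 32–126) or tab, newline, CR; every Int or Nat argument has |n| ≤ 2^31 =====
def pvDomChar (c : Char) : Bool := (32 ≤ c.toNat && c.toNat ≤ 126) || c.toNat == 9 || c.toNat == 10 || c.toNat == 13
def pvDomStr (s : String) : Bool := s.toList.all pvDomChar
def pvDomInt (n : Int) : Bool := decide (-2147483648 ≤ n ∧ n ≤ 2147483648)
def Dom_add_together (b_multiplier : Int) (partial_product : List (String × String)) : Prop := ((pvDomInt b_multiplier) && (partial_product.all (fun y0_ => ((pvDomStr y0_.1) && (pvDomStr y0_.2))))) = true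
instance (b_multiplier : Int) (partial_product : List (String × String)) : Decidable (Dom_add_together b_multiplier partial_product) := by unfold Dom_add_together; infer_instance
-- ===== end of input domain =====

-- B replaces A's digit-accumulator array, carry-propagation pass and digit-join by one running
-- integer total (objective: simpler); equal on Pre_ (digit-keyed products of bounded length).

-- ===== PORT A =====
-- int(p_digit): PySem.Int.ofStr? is exact; none = ValueError (excluded by Pre_), .getD 0 is a dead default there
def pvDigitA (c : Char) : Int := (PySem.Int.ofStr? (String.singleton c)).getD 0

-- accu[i+j] += int(p_digit); pyGet? none = IndexError (excluded by Pre_, the list is returned unchanged there)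
def pvStepInnerA (i : Int) (accu : List Int) (jp : Int × Char) : List Int :=
  match PySem.List.pyGet? accu (i + jp.1) with
  | none => accu
  | some a => accu.set (i + jp.1).toNat (a + pvDigitA jp.2)

-- body of `for (i,b_digit) in enumerate(reversed(b_multiplier))`; getD "" : Python raises KeyError on a
-- missing key (excluded by Pre_); then the inner loop over the empty product is a no-op
def pvStepOuterA (d : PySem.Dict String String) (accu : List Int) (ib : Int × Char) : List Int :=
  (PySem.List.enumerate ((d.getD (String.singleton ib.2) "").toList.reverse)).foldl (pvStepInnerA ib.1) accu

-- body of the carry loop: val = carry + accu[i]; accu[i] = val % 10; carry = val // 10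
def pvCarryStep (st : List Int × Int) (i : Nat) : List Int × Int :=
  let val := st.2 + st.1.getD i 0
  (st.1.set i (PySem.Int.mod val 10), PySem.Int.floordiv val 10)

def add_together (b_multiplier : Int) (partial_product : List (String × String)) : String :=
  let bm := PySem.Int.toChars b_multiplier              -- b_multiplier = str(b_multiplier)
  let d := PySem.Dict.mk partial_product
  match d.get? "1" with
  | none => ""                                          -- Python: KeyError (excluded by Pre_)
  | some p1 =>
    let accu0 : List Int := List.replicate (1 + bm.length + p1.toList.length) 0
    let accu1 := (PySem.List.enumerate bm.reverse).foldl (pvStepOuterA d) accu0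
    let st := (List.range accu1.length).foldl pvCarryStep (accu1, 0)
    -- ''.join(str(_) for _ in reversed(accu)).lstrip('0'); dropWhile (· == '0') is exact for the one-char strip set '0'
    String.ofList (List.dropWhile (· == '0') (PySem.Chars.join [] (st.1.reverse.map PySem.Int.toChars)))

-- ===== PORT B =====
-- total += int(p_digit) * 10 ** (i + j); the exponent i + j is ≥ 0, so ^ on .toNat is exact
def pvStepInnerB (i : Int) (total : Int) (jp : Int × Char) : Int :=
  total + ((PySem.Int.ofStr? (String.singleton jp.2)).getD 0) * 10 ^ (i + jp.1).toNat

def pvStepOuterB (d : PySem.Dict String String) (total : Int) (ib : Int × Char) : Int :=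
  (PySem.List.enumerate ((d.getD (String.singleton ib.2) "").toList.reverse)).foldl (pvStepInnerB ib.1) total

def add_together_alt (b_multiplier : Int) (partial_product : List (String × String)) : String :=
  let d := PySem.Dict.mk partial_product
  let total := (PySem.List.enumerate (PySem.Int.toChars b_multiplier).reverse).foldl (pvStepOuterB d) 0
  -- str(total).lstrip('0')
  String.ofList (List.dropWhile (· == '0') (PySem.Int.toChars total))

-- ===== PRECONDITION & SPEC =====
-- Pre_ excludes inputs where Python A raises (missing '1' or digit key → KeyError, a non-digit product
-- character → ValueError, a product overrunning the accumulator → IndexError) and, beyond that, product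
-- values longer than len(partial_product['1'])+1, on which A silently drops the final carry of its
-- fixed-size accumulator (sum truncated) while B returns the full sum.
def Pre_add_together (b_multiplier : Int) (partial_product : List (String × String)) : Prop :=
  let d := PySem.Dict.mk partial_product
  ((d.get? "1").isSome
    && (PySem.Int.toChars b_multiplier).all (fun c =>
         (d.get? (String.singleton c)).isSome
         && decide ((d.getD (String.singleton c) "").toList.length ≤ (d.getD "1" "").toList.length + 1)
         && (d.getD (String.singleton c) "").toList.all (fun ch => decide ('0' ≤ ch) && decide (ch ≤ '9')))) = true
instance (b_multiplier : Int) (partial_product : List (String × String)) : Decidable (Pre_add_together b_multiplier partial_product) := by unfold Pre_add_together; infer_instance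

def pvWitness_add_together : Int × (List (String × String)) := (12, [("1", "3"), ("2", "6")])

def Spec_add_together (b_multiplier : Int) (partial_product : List (String × String)) (out : String) : Prop := out = add_together_alt b_multiplier partial_product
instance (b_multiplier : Int) (partial_product : List (String × String)) (out : String) : Decidable (Spec_add_together b_multiplier partial_product out) := by unfold Spec_add_together; infer_instance

-- ===== CLAIM (what is proved, stated in full; the proofs are below) =====
def Claim_equal_add_together : Prop := ∀ (b_multiplier : Int) (partial_product : List (String × String)), Dom_add_together b_multiplier partial_product → Pre_add_together b_multiplier partial_product → Spec_add_together b_multiplier partial_product (add_together b_multiplier partial_product)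

-- ===== LEMMAS AND PROOFS =====

-- value of a little-endian list of digit positions: val10 [a0,a1,…] = a0 + 10·a1 + …
def val10 : List Int → Int
  | [] => 0
  | a :: t => a + 10 * val10 t

-- value of a little-endian list of digit CHARS
def lval : List Char → Int
  | [] => 0
  | c :: t => ((c.toNat : Int) - 48) + 10 * lval t

-- contribution of the remaining multiplier digits, starting at shift s
def pvPval (d : PySem.Dict String String) (c : Char) : Int :=
  lval ((d.getD (String.singleton c) "").toList.reverse)
def pvContrib (d : PySem.Dict String String) : List Char → Nat → Int
  | [], _ => 0
  | c :: cs, s => pvPval d c * 10 ^ s + pvContrib d cs (s + 1)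

theorem val10_replicate (n : Nat) : val10 (List.replicate n 0) = 0 := by
  induction n with
  | zero => simp [val10]
  | succ n ih => simp [List.replicate, val10, ih]

theorem val10_append (xs ys : List Int) :
    val10 (xs ++ ys) = val10 xs + 10 ^ xs.length * val10 ys := by
  induction xs with
  | nil => simp [val10]
  | cons a t ih => simp [val10, ih, pow_succ]; ring

theorem val10_take_succ (acc : List Int) (n : Nat) (h : n < acc.length) :
    val10 (acc.take (n + 1)) = val10 (acc.take n) + acc[n] * 10 ^ n := by
  have hts : acc.take (n + 1) = acc.take n ++ [acc[n]] := by
    rw [List.take_add_one]; simp [List.getElem?_eq_getElem h]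
  rw [hts, val10_append]
  simp [val10, Nat.min_eq_left h.le]
  ring

theorem val10_take_drop (acc : List Int) (n : Nat) (h : n ≤ acc.length) :
    val10 acc = val10 (acc.take n) + 10 ^ n * val10 (acc.drop n) := by
  conv_lhs => rw [← List.take_append_drop n acc]
  rw [val10_append, List.length_take, Nat.min_eq_left h]

theorem val10_set (acc : List Int) (k : Nat) (v : Int) (h : k < acc.length) :
    val10 (acc.set k v) = val10 acc + (v - acc[k]) * 10 ^ k := by
  induction acc generalizing k with
  | nil => simp at h
  | cons a t ih =>
    cases k with
    | zero => simp [val10]; ring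
    | succ k =>
      simp only [List.set_cons_succ, val10]
      rw [ih k (by simpa using h)]
      simp [pow_succ]; ring

theorem lval_nonneg (ds : List Char) (h : ∀ c ∈ ds, '0' ≤ c ∧ c ≤ '9') : 0 ≤ lval ds := by
  induction ds with
  | nil => simp [lval]
  | cons c t ih =>
    have h1 : 48 ≤ c.toNat := (h c (by simp)).1
    have ht := ih (fun x hx => h x (by simp [hx]))
    simp only [lval]; omega

theorem lval_lt (ds : List Char) (h : ∀ c ∈ ds, '0' ≤ c ∧ c ≤ '9') : lval ds < 10 ^ ds.length := by
  induction ds with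
  | nil => simp [lval]
  | cons c t ih =>
    have h2 : c.toNat ≤ 57 := (h c (by simp)).2
    have ht := ih (fun x hx => h x (by simp [hx]))
    simp only [lval, List.length_cons, pow_succ]
    omega

theorem digit_ofChars (c : Char) (h0 : '0' ≤ c) (h9 : c ≤ '9') :
    PySem.Int.ofStr? (String.singleton c) = some ((c.toNat : Int) - 48) := by
  have h1 : 48 ≤ c.toNat := h0
  have h2 : c.toNat ≤ 57 := h9
  have hc : Char.ofNat c.toNat = c := Char.ofNat_toNat c
  rw [← hc]; interval_cases h : c.toNat <;> decide

theorem innerA_fold (ds : List Char) (hd : ∀ c ∈ ds, '0' ≤ c ∧ c ≤ '9') :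
    ∀ (s : Nat) (acc : List Int) (i : Nat), i + s + ds.length ≤ acc.length →
    ((PySem.List.enumerate ds (s : Int)).foldl (pvStepInnerA (i : Int)) acc).length = acc.length ∧
    val10 ((PySem.List.enumerate ds (s : Int)).foldl (pvStepInnerA (i : Int)) acc)
      = val10 acc + lval ds * 10 ^ (i + s) := by
  induction ds with
  | nil => intro s acc i h; simp [PySem.List.enumerate, lval]
  | cons c t ih =>
    intro s acc i h
    have his : i + s < acc.length := by simp at h; omega
    have hstep : pvStepInnerA (i : Int) acc ((s : Int), c)
        = acc.set (i + s) (acc[i + s] + ((c.toNat : Int) - 48)) := by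
      have hg : PySem.List.pyGet? acc ((i : Int) + (s : Int)) = some acc[i + s] := by
        have : ((i : Int) + (s : Int)) = ((i + s : Nat) : Int) := by push_cast; ring
        rw [this, PySem.List.pyGet?_natCast, List.getElem?_eq_getElem his]
      simp only [pvStepInnerA, hg, pvDigitA, digit_ofChars c (hd c (by simp)).1 (hd c (by simp)).2, Option.getD_some]
      have hts : ((i : Int) + (s : Int)).toNat = i + s := by omega
      rw [hts]
    rw [PySem.List.enumerate_cons, List.foldl_cons, hstep]
    have hcast : ((s : Int) + 1) = ((s + 1 : Nat) : Int) := by push_cast; ring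
    rw [hcast]
    have hlen : (acc.set (i + s) (acc[i + s] + ((c.toNat : Int) - 48))).length = acc.length := by simp
    obtain ⟨ihl, ihv⟩ := ih (fun x hx => hd x (by simp [hx])) (s + 1)
      (acc.set (i + s) (acc[i + s] + ((c.toNat : Int) - 48))) i (by simp at h ⊢; omega)
    refine ⟨by rw [ihl, hlen], ?_⟩
    rw [ihv, val10_set acc (i + s) _ his]
    simp only [lval]
    rw [show i + (s + 1) = (i + s) + 1 by ring, pow_succ]
    ring

theorem innerB_fold (ds : List Char) (hd : ∀ c ∈ ds, '0' ≤ c ∧ c ≤ '9') :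
    ∀ (s : Nat) (t : Int) (i : Nat),
    (PySem.List.enumerate ds (s : Int)).foldl (pvStepInnerB (i : Int)) t
      = t + lval ds * 10 ^ (i + s) := by
  induction ds with
  | nil => intro s t i; simp [PySem.List.enumerate, lval]
  | cons c t ih =>
    intro s t0 i
    rw [PySem.List.enumerate_cons, List.foldl_cons]
    have hcast : ((s : Int) + 1) = ((s + 1 : Nat) : Int) := by push_cast; ring
    rw [hcast, ih (fun x hx => hd x (by simp [hx]))]
    simp only [pvStepInnerB, digit_ofChars c (hd c (by simp)).1 (hd c (by simp)).2]
    have : ((i : Int) + (s : Int)).toNat = i + s := by omega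
    rw [this]
    simp only [lval, Option.getD_some]
    rw [show i + (s + 1) = (i + s) + 1 by ring, pow_succ]
    ring

theorem outerA_fold (d : PySem.Dict String String) (M : Nat) (cs : List Char)
    (hd : ∀ c ∈ cs, (∀ ch ∈ (d.getD (String.singleton c) "").toList, '0' ≤ ch ∧ ch ≤ '9') ∧
          (d.getD (String.singleton c) "").toList.length ≤ M) :
    ∀ (s : Nat) (acc : List Int), s + cs.length + M ≤ acc.length →
    ((PySem.List.enumerate cs (s : Int)).foldl (pvStepOuterA d) acc).length = acc.length ∧
    val10 ((PySem.List.enumerate cs (s : Int)).foldl (pvStepOuterA d) acc)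
      = val10 acc + pvContrib d cs s := by
  induction cs with
  | nil => intro s acc h; simp [PySem.List.enumerate, pvContrib]
  | cons c t ih =>
    intro s acc h
    rw [PySem.List.enumerate_cons, List.foldl_cons]
    have hds : ∀ ch ∈ (d.getD (String.singleton c) "").toList.reverse, '0' ≤ ch ∧ ch ≤ '9' :=
      fun ch hch => (hd c (by simp)).1 ch (List.mem_reverse.mp hch)
    have hlen : s + 0 + (d.getD (String.singleton c) "").toList.reverse.length ≤ acc.length := by
      have h2 := (hd c (by simp)).2
      simp only [List.length_cons, List.length_reverse, String.length_toList] at h h2 ⊢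
      omega
    have hstep := innerA_fold _ hds 0 acc s hlen
    have hz : (0 : Int) = ((0 : Nat) : Int) := rfl
    have hstepA : pvStepOuterA d acc ((s : Int), c)
        = (PySem.List.enumerate ((d.getD (String.singleton c) "").toList.reverse) ((0:Nat) : Int)).foldl (pvStepInnerA ((s:Nat) : Int)) acc := by
      simp [pvStepOuterA]
    rw [hstepA]
    have hcast : ((s : Int) + 1) = ((s + 1 : Nat) : Int) := by push_cast; ring
    rw [hcast]
    obtain ⟨ihl, ihv⟩ := ih (fun x hx => hd x (by simp [hx])) (s + 1) _
      (by rw [hstep.1]; simp only [List.length_cons] at h ⊢; omega)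
    refine ⟨by rw [ihl, hstep.1], ?_⟩
    rw [ihv, hstep.2]
    simp [pvContrib, pvPval]
    ring

theorem outerB_fold (d : PySem.Dict String String) (cs : List Char)
    (hd : ∀ c ∈ cs, ∀ ch ∈ (d.getD (String.singleton c) "").toList, '0' ≤ ch ∧ ch ≤ '9') :
    ∀ (s : Nat) (t : Int),
    (PySem.List.enumerate cs (s : Int)).foldl (pvStepOuterB d) t = t + pvContrib d cs s := by
  induction cs with
  | nil => intro s t; simp [PySem.List.enumerate, pvContrib]
  | cons c t ih =>
    intro s t0
    rw [PySem.List.enumerate_cons, List.foldl_cons]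
    have hds : ∀ ch ∈ (d.getD (String.singleton c) "").toList.reverse, '0' ≤ ch ∧ ch ≤ '9' :=
      fun ch hch => hd c (by simp) ch (List.mem_reverse.mp hch)
    have hstepB : pvStepOuterB d t0 ((s : Int), c)
        = (PySem.List.enumerate ((d.getD (String.singleton c) "").toList.reverse) ((0:Nat) : Int)).foldl (pvStepInnerB ((s:Nat) : Int)) t0 := by
      simp [pvStepOuterB]
    rw [hstepB, innerB_fold _ hds 0 t0 s]
    have hcast : ((s : Int) + 1) = ((s + 1 : Nat) : Int) := by push_cast; ring
    rw [hcast, ih (fun x hx => hd x (by simp [hx])) (s + 1)]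
    simp [pvContrib, pvPval]
    ring

theorem contrib_nonneg (d : PySem.Dict String String) (cs : List Char)
    (hd : ∀ c ∈ cs, ∀ ch ∈ (d.getD (String.singleton c) "").toList, '0' ≤ ch ∧ ch ≤ '9') :
    ∀ s : Nat, 0 ≤ pvContrib d cs s := by
  induction cs with
  | nil => intro s; simp [pvContrib]
  | cons c t ih =>
    intro s
    have h1 : 0 ≤ pvPval d c := lval_nonneg _ (fun ch hch => hd c (by simp) ch (List.mem_reverse.mp hch))
    have h2 := ih (fun x hx => hd x (by simp [hx])) (s + 1)
    have h3 : (0:Int) < 10 ^ s := by positivity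
    simp only [pvContrib]
    nlinarith

theorem contrib_lt (d : PySem.Dict String String) (M : Nat) (cs : List Char)
    (hd : ∀ c ∈ cs, (∀ ch ∈ (d.getD (String.singleton c) "").toList, '0' ≤ ch ∧ ch ≤ '9') ∧
          (d.getD (String.singleton c) "").toList.length ≤ M) :
    ∀ s : Nat, pvContrib d cs s ≤ 10 ^ (s + cs.length + M) - 10 ^ (s + M) := by
  induction cs with
  | nil => intro s; simp [pvContrib]
  | cons c t ih =>
    intro s
    have hds : ∀ ch ∈ (d.getD (String.singleton c) "").toList.reverse, '0' ≤ ch ∧ ch ≤ '9' :=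
      fun ch hch => (hd c (by simp)).1 ch (List.mem_reverse.mp hch)
    have h1 : pvPval d c < 10 ^ (d.getD (String.singleton c) "").toList.reverse.length :=
      lval_lt _ hds
    have h1' : pvPval d c ≤ 10 ^ M - 1 := by
      have hm : (d.getD (String.singleton c) "").toList.reverse.length ≤ M := by
        simpa using (hd c (by simp)).2
      have : (10:Int) ^ (d.getD (String.singleton c) "").toList.reverse.length ≤ 10 ^ M :=
        pow_le_pow_right₀ (by norm_num) hm
      omega
    have h2 := ih (fun x hx => hd x (by simp [hx])) (s + 1)
    simp only [pvContrib, List.length_cons]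
    have e1 : s + 1 + t.length + M = s + (t.length + 1) + M := by ring
    rw [e1] at h2
    have h3 : (0:Int) < 10 ^ s := by positivity
    have h4 : (10:Int) ^ (s + M) * 10 = 10 ^ (s + M + 1) := by rw [pow_succ]
    have h5 : (10:Int) ^ (s + 1 + M) = 10 ^ (s + M + 1) := by ring_nf
    have h6 : (10:Int) ^ (s + M) = 10 ^ s * 10 ^ M := by rw [pow_add]
    nlinarith [pow_pos (show (0:Int) < 10 by norm_num) (s + M)]

theorem carry_fold (acc : List Int) :
    ∀ n, n ≤ acc.length →
    (List.range n).foldl pvCarryStep (acc, 0)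
      = ((List.range n).map (fun k => val10 acc / 10 ^ k % 10) ++ acc.drop n,
         val10 (acc.take n) / 10 ^ n) := by
  intro n
  induction n with
  | zero => intro h; simp [val10]
  | succ n ih =>
    intro h
    have hn : n < acc.length := by omega
    rw [List.range_succ, List.foldl_append, ih (by omega), List.foldl_cons, List.foldl_nil]
    have hget : ((List.range n).map (fun k => val10 acc / 10 ^ k % 10) ++ acc.drop n).getD n 0
        = acc[n] := by
      rw [List.getD_eq_getElem?_getD, List.getElem?_append_right (by simp)]
      simp [hn]
    have hval : val10 (acc.take n) / 10 ^ n + acc[n] = val10 (acc.take (n + 1)) / 10 ^ n := by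
      rw [val10_take_succ acc n hn, Int.add_mul_ediv_right _ _ (by positivity)]
    simp only [pvCarryStep, hget]
    rw [hval]
    have hmodc : PySem.Int.mod (val10 (acc.take (n+1)) / 10 ^ n) 10
        = val10 acc / 10 ^ n % 10 := by
      rw [PySem.Int.mod_eq_emod_of_pos (by norm_num)]
      have hsplit := val10_take_drop acc (n+1) (by omega)
      have : val10 acc / 10 ^ n = val10 (acc.take (n+1)) / 10 ^ n + 10 * val10 (acc.drop (n+1)) := by
        rw [hsplit]
        rw [show (10:Int) ^ (n+1) * val10 (acc.drop (n+1)) = (10 * val10 (acc.drop (n+1))) * 10 ^ n by rw [pow_succ]; ring]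
        rw [Int.add_mul_ediv_right _ _ (by positivity)]
      rw [this, Int.add_mul_emod_self_left]
    have hdivc : PySem.Int.floordiv (val10 (acc.take (n+1)) / 10 ^ n) 10
        = val10 (acc.take (n+1)) / 10 ^ (n+1) := by
      rw [PySem.Int.floordiv_eq_ediv_of_pos (by norm_num)]
      rw [Int.ediv_ediv_of_nonneg (by positivity), pow_succ]
    rw [hmodc, hdivc]
    congr 1
    simp only [List.map_append, List.map_cons, List.map_nil]
    rw [List.set_append]
    simp only [List.length_map, List.length_range]
    rw [if_neg (by omega), Nat.sub_self, List.drop_eq_getElem_cons hn, List.set_cons_zero]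
    simp

theorem toChars_small (m : Int) (h0 : 0 ≤ m) (h10 : m < 10) :
    PySem.Int.toChars m = [Nat.digitChar m.toNat] := by
  interval_cases m <;> decide

theorem toChars_nonneg (S : Int) (h : 0 ≤ S) :
    PySem.Int.toChars S = Nat.toDigits 10 S.toNat := by
  simp [PySem.Int.toChars, not_lt.mpr h]

theorem core_append : ∀ (f n : Nat) (l : List Char),
    Nat.toDigitsCore 10 f n l = Nat.toDigitsCore 10 f n [] ++ l := by
  intro f
  induction f with
  | zero => intro n l; simp [Nat.toDigitsCore]
  | succ f ih =>
    intro n l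
    simp only [Nat.toDigitsCore]
    by_cases h : n / 10 = 0
    · simp [h]
    · simp only [if_neg h]
      rw [ih (n / 10) (Nat.digitChar (n % 10) :: l), ih (n / 10) [Nat.digitChar (n % 10)]]
      simp

theorem core_fuel : ∀ (n : Nat), ∀ (f f' : Nat), n < f → n < f' →
    Nat.toDigitsCore 10 f n [] = Nat.toDigitsCore 10 f' n [] := by
  intro n
  induction n using Nat.strong_induction_on with
  | _ n ih =>
    intro f f' hf hf'
    obtain ⟨g, rfl⟩ : ∃ g, f = g + 1 := ⟨f - 1, by omega⟩
    obtain ⟨g', rfl⟩ : ∃ g', f' = g' + 1 := ⟨f' - 1, by omega⟩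
    simp only [Nat.toDigitsCore]
    by_cases h : n / 10 = 0
    · simp [h]
    · simp only [if_neg h]
      rw [core_append g, core_append g']
      have hlt : n / 10 < n := Nat.div_lt_self (by omega) (by norm_num)
      rw [ih (n / 10) hlt g g' (by omega) (by omega)]

theorem toDigits10_rec (n : Nat) (h : 10 ≤ n) :
    Nat.toDigits 10 n = Nat.toDigits 10 (n / 10) ++ [Nat.digitChar (n % 10)] := by
  show Nat.toDigitsCore 10 (n + 1) n [] = _
  simp only [Nat.toDigitsCore]
  rw [if_neg (by omega)]
  rw [core_append n]
  congr 1
  exact core_fuel (n / 10) n (n / 10 + 1) (by omega) (by omega)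

theorem digits_exact : ∀ (m N : Nat), 10 ^ m ≤ N → N < 10 ^ (m + 1) →
    Nat.toDigits 10 N = (List.range (m + 1)).reverse.map (fun k => Nat.digitChar (N / 10 ^ k % 10)) := by
  intro m
  induction m with
  | zero =>
    intro N h1 h2
    have h2' : N < 10 := by simpa using h2
    show Nat.toDigitsCore 10 (N + 1) N [] = _
    simp only [Nat.toDigitsCore]
    rw [if_pos (Nat.div_eq_of_lt h2')]
    simp [Nat.mod_eq_of_lt h2']
  | succ m ih =>
    intro N h1 h2
    have h10 : 10 ≤ N := le_trans (by have : 10 ^ 1 ≤ 10 ^ (m+1) := Nat.pow_le_pow_right (by norm_num) (by omega); simpa using this) h1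
    rw [toDigits10_rec N h10]
    have hd1 : 10 ^ m ≤ N / 10 := Nat.le_div_iff_mul_le (by norm_num) |>.mpr (by rw [← pow_succ]; exact h1)
    have hd2 : N / 10 < 10 ^ (m + 1) := Nat.div_lt_iff_lt_mul (by norm_num) |>.mpr (by rw [← pow_succ]; exact h2)
    rw [ih (N / 10) hd1 hd2]
    have key : (List.range (m + 1 + 1)).reverse.map (fun k => Nat.digitChar (N / 10 ^ k % 10))
        = ((List.range (m + 1)).reverse.map (fun k => Nat.digitChar (N / 10 / 10 ^ k % 10)))
            ++ [Nat.digitChar (N % 10)] := by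
      rw [List.range_succ_eq_map]
      simp only [List.reverse_cons, List.map_append, List.map_reverse, List.map_map,
        List.map_cons, List.map_nil]
      congr 1
      · congr 1
        apply List.map_congr_left
        intro k _
        simp only [Function.comp_def]
        congr 2
        rw [Nat.div_div_eq_div_mul, ← pow_succ']
      · simp
    rw [key]

theorem dropWhile_pad : ∀ (n N : Nat), N < 10 ^ n →
    ((List.range n).reverse.map (fun k => Nat.digitChar (N / 10 ^ k % 10))).dropWhile (· == '0')
      = (Nat.toDigits 10 N).dropWhile (· == '0') := by
  intro n
  induction n with
  | zero =>
    intro N h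
    have : N = 0 := by omega
    subst this
    decide
  | succ n ih =>
    intro N h
    have hrev : (List.range (n+1)).reverse = n :: (List.range n).reverse := by
      rw [List.range_succ]; simp
    rw [hrev, List.map_cons, List.dropWhile_cons]
    by_cases hN : N < 10 ^ n
    · have hz : N / 10 ^ n = 0 := Nat.div_eq_of_lt hN
      rw [hz]
      rw [if_pos (by decide)]
      exact ih N hN
    · rw [Nat.not_lt] at hN
      have hne : Nat.digitChar (N / 10 ^ n % 10) ≠ '0' := by
        have h1 : 1 ≤ N / 10 ^ n := Nat.le_div_iff_mul_le (by positivity) |>.mpr (by omega)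
        have h2 : N / 10 ^ n < 10 := Nat.div_lt_iff_lt_mul (by positivity) |>.mpr (by rw [mul_comm, ← pow_succ]; exact h)
        have h3 : N / 10 ^ n % 10 = N / 10 ^ n := Nat.mod_eq_of_lt h2
        rw [h3]
        interval_cases h4 : N / 10 ^ n <;> decide
      rw [if_neg (by simpa using hne)]
      rw [digits_exact n N hN h]
      rw [hrev, List.map_cons, List.dropWhile_cons, if_neg (by simpa using hne)]


theorem toChars_digit (m : Nat) (h : m < 10) :
    PySem.Int.toChars ((m : Nat) : Int) = [Nat.digitChar m] := by
  rw [toChars_small _ (by positivity) (by exact_mod_cast h)]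
  simp

-- ===== VERDICT (by name: the statement is the Claim_ definition above) =====
theorem add_together_spec : Claim_equal_add_together := by
  intro b pp _hdom hpre
  unfold Spec_add_together add_together add_together_alt
  dsimp only
  unfold Pre_add_together at hpre
  simp only [Bool.and_eq_true, List.all_eq_true, decide_eq_true_eq] at hpre
  obtain ⟨h1, h2⟩ := hpre
  obtain ⟨p1, hp1⟩ := Option.isSome_iff_exists.mp h1
  rw [hp1]
  dsimp only
  set d := PySem.Dict.mk pp with hd
  set bs := PySem.Int.toChars b with hbs
  set L := p1.toList.length with hL
  have hgetD1 : d.getD "1" "" = p1 := PySem.Dict.getD_of_get?_eq_some d "" hp1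
  have hdig : ∀ c ∈ bs.reverse, ∀ ch ∈ (d.getD (String.singleton c) "").toList, '0' ≤ ch ∧ ch ≤ '9' :=
    fun c hc => (h2 c (List.mem_reverse.mp hc)).2
  have hhyp : ∀ c ∈ bs.reverse, (∀ ch ∈ (d.getD (String.singleton c) "").toList, '0' ≤ ch ∧ ch ≤ '9') ∧
      (d.getD (String.singleton c) "").toList.length ≤ L + 1 := by
    intro c hc
    refine ⟨hdig c hc, ?_⟩
    have := (h2 c (List.mem_reverse.mp hc)).1.2
    rw [hgetD1] at this
    exact this
  set n0 := 1 + bs.length + L with hn0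
  -- A's accumulation
  have hA := outerA_fold d (L + 1) bs.reverse hhyp 0 (List.replicate n0 0)
    (by simp [hn0]; omega)
  rw [Nat.cast_zero] at hA
  -- B's accumulation
  have hB := outerB_fold d bs.reverse hdig 0 0
  rw [Nat.cast_zero] at hB
  set T := pvContrib d bs.reverse 0 with hT
  have hTnn : 0 ≤ T := contrib_nonneg d bs.reverse hdig 0
  have hTlt : T < 10 ^ n0 := by
    have := contrib_lt d (L + 1) bs.reverse hhyp 0
    have hpow : (0:Int) < 10 ^ (0 + (L + 1)) := by positivity
    have he : 0 + bs.reverse.length + (L + 1) = n0 := by simp [hn0]; omega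
    rw [he] at this
    omega
  set accu1 := (PySem.List.enumerate bs.reverse 0).foldl (pvStepOuterA d) (List.replicate n0 0) with haccu1
  have hlen1 : accu1.length = n0 := by rw [hA.1]; simp
  have hval1 : val10 accu1 = T := by rw [hA.2, val10_replicate]; ring
  -- carry propagation
  have hC := carry_fold accu1 accu1.length (le_refl _)
  rw [hC]
  simp only [List.drop_length, List.append_nil, hval1]
  rw [hlen1]
  -- both sides print the same digits
  set N := T.toNat with hN
  have hTN : T = (N : Int) := (Int.toNat_of_nonneg hTnn).symm
  have hNlt : N < 10 ^ n0 := by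
    have : ((N : Int)) < ((10 ^ n0 : Nat) : Int) := by push_cast; rw [← hTN]; exact hTlt
    exact_mod_cast this
  have hfk : ∀ k : Nat, T / 10 ^ k % 10 = ((N / 10 ^ k % 10 : Nat) : Int) := by
    intro k
    rw [hTN]
    push_cast
    rfl
  have hmap : (List.range n0).map (fun k => T / 10 ^ k % 10)
      = (List.range n0).map (fun k => ((N / 10 ^ k % 10 : Nat) : Int)) := by
    apply List.map_congr_left
    intro k _
    rw [hfk]
  rw [hmap]
  have hchars : ((List.range n0).map (fun k => ((N / 10 ^ k % 10 : Nat) : Int))).reverse.map PySem.Int.toChars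
      = ((List.range n0).reverse.map (fun k => Nat.digitChar (N / 10 ^ k % 10))).map (fun c => [c]) := by
    rw [← List.map_reverse, List.map_map, List.map_map]
    apply List.map_congr_left
    intro k _
    simp only [Function.comp_def]
    exact toChars_digit _ (Nat.mod_lt _ (by norm_num))
  rw [hchars, PySem.Chars.join_nil_singletons, dropWhile_pad n0 N hNlt]
  have hBT : (PySem.List.enumerate bs.reverse 0).foldl (pvStepOuterB d) 0 = T := by
    rw [hB]; ring
  rw [hBT, toChars_nonneg T hTnn]
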